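-- pv_equiv track=rewrite | github.com/ikanmakarel01/F_files | fungsi_kali.py | perkalian
-- ===== SOURCE A (Python) =====
-- def perkalian(no1, no2):
--     hasil = 0
--     spasi = ""
--     for i in range(no1):
--         hasil = hasil + no2
--         if i == 0:
--             spasi = str(no2)
--         else:
--             spasi = spasi + " + " + str(no2)
--     return f"{no1} x {no2} = {spasi} = {hasil}"
-- ===== SOURCE B (Python) =====
-- def perkalian(no1, no2):
--     hasil = max(no1, 0) * no2
--     spasi = " + ".join([str(no2)] * no1)
--     return f"{no1} x {no2} = {spasi} = {hasil}"
-- ===== Notes on version B (the rewrite author's own statement) =====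
-- stated objective: faster
-- what changed: Replaces the repeated-addition loop with quadratic incremental string concatenation by a closed-form product (multiplier clamped at 0) and a single join over a repeated list.
import Mathlib
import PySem

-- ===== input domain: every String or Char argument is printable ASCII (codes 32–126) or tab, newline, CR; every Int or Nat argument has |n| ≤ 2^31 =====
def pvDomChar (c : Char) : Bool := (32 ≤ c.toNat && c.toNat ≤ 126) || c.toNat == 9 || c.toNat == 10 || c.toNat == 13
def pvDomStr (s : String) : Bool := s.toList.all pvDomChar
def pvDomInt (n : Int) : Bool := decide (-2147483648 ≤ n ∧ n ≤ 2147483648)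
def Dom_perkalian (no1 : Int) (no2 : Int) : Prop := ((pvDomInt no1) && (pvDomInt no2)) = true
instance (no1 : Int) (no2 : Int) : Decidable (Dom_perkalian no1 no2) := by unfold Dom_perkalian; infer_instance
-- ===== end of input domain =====

-- B replaces A's repeated-addition loop and incremental concatenation by a closed-form product and one join (simpler).

-- ===== PORT A =====
def perkalian (no1 : Int) (no2 : Int) : String :=
  let st := (PySem.List.pyRange 0 no1 1).foldl
    (fun (st : Int × String) (i : Int) =>
      (st.1 + no2,
       if i == 0 then PySem.Int.toStr no2
       else st.2 ++ " + " ++ PySem.Int.toStr no2))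
    (0, "")
  PySem.Int.toStr no1 ++ " x " ++ PySem.Int.toStr no2 ++ " = " ++ st.2 ++ " = " ++ PySem.Int.toStr st.1

-- ===== PORT B =====
def perkalian_alt (no1 : Int) (no2 : Int) : String :=
  let hasil := max no1 0 * no2
  let spasi := PySem.Str.join " + " (List.replicate no1.toNat (PySem.Int.toStr no2))
  PySem.Int.toStr no1 ++ " x " ++ PySem.Int.toStr no2 ++ " = " ++ spasi ++ " = " ++ PySem.Int.toStr hasil

-- ===== PRECONDITION & SPEC =====
def Spec_perkalian (no1 : Int) (no2 : Int) (out : String) : Prop := out = perkalian_alt no1 no2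
instance (no1 : Int) (no2 : Int) (out : String) : Decidable (Spec_perkalian no1 no2 out) := by unfold Spec_perkalian; infer_instance

-- ===== CLAIM (what is proved, stated in full; the proofs are below) =====
def Claim_equal_perkalian : Prop := ∀ (no1 : Int) (no2 : Int), Dom_perkalian no1 no2 → Spec_perkalian no1 no2 (perkalian no1 no2)

-- ===== LEMMAS AND PROOFS =====

-- joining one more piece at the back appends 'sep ++ x' (List Char level)
lemma chars_join_snoc (sep x : List Char) :
    ∀ (l : List (List Char)) (a : List Char),
      PySem.Chars.join sep ((a :: l) ++ [x])
        = PySem.Chars.join sep (a :: l) ++ sep ++ x := by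
  intro l
  induction l with
  | nil =>
    intro a
    simp [PySem.Chars.join_cons_cons, PySem.Chars.join_singleton]
  | cons b u ih =>
    intro a
    have h1 : (a :: b :: u) ++ [x] = a :: ((b :: u) ++ [x]) := by simp
    rw [h1]
    have h2 : ((b :: u) ++ [x]) = b :: (u ++ [x]) := by simp
    rw [h2, show a :: b :: (u ++ [x]) = a :: b :: (u ++ [x]) from rfl,
        PySem.Chars.join_cons_cons, ← h2, ih b, PySem.Chars.join_cons_cons]
    simp [List.append_assoc]

-- joining n+1 copies (n ≥ 1) appends one more 'sep ++ x' at the back (List Char level)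
lemma chars_join_replicate_succ (sep x : List Char) (n : Nat) (hn : 1 ≤ n) :
    PySem.Chars.join sep (List.replicate (n + 1) x)
      = PySem.Chars.join sep (List.replicate n x) ++ sep ++ x := by
  obtain ⟨m, rfl⟩ : ∃ m, n = m + 1 := ⟨n - 1, by omega⟩
  have h : List.replicate (m + 1 + 1) x = (x :: List.replicate m x) ++ [x] := by
    rw [List.replicate_succ, List.replicate_succ']
    simp
  rw [h, chars_join_snoc, ← List.replicate_succ]

-- the same at the String level
lemma join_replicate_succ (x : String) (n : Nat) (hn : 1 ≤ n) :
    PySem.Str.join " + " (List.replicate (n + 1) x)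
      = PySem.Str.join " + " (List.replicate n x) ++ " + " ++ x := by
  have h := chars_join_replicate_succ " + ".toList x.toList n hn
  apply String.ext
  simp only [PySem.Str.toList_join, String.toList_append, List.map_replicate]
  exact h

-- characterisation of A's loop: after n iterations, hasil = n*no2 and spasi joins n copies
lemma perkalian_loop (no2 : Int) (n : Nat) :
    (PySem.List.pyRange 0 (n : Int) 1).foldl
      (fun (st : Int × String) (i : Int) =>
        (st.1 + no2,
         if i == 0 then PySem.Int.toStr no2
         else st.2 ++ " + " ++ PySem.Int.toStr no2))
      (0, "")
    = ((n : Int) * no2,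
       PySem.Str.join " + " (List.replicate n (PySem.Int.toStr no2))) := by
  induction n with
  | zero =>
    simp [PySem.List.pyRange_one_eq_nil, PySem.Str.join]
  | succ m ih =>
    have hsplit : PySem.List.pyRange 0 ((m + 1 : Nat) : Int) 1
        = PySem.List.pyRange 0 (m : Int) 1 ++ [(m : Int)] := by
      have h := PySem.List.pyRange_one_succ_right (a := 0) (b := (m : Int))
        (by exact_mod_cast Nat.zero_le m)
      push_cast
      exact h
    rw [hsplit, List.foldl_append, ih]
    cases m with
    | zero =>
      have : PySem.Str.join " + " [PySem.Int.toStr no2] = PySem.Int.toStr no2 := by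
        apply String.ext
        simp [PySem.Str.toList_join, PySem.Chars.join_singleton]
      simp [this]
    | succ k =>
      have hne : (((k + 1 : Nat) : Int) == 0) = false := by
        simp
        push_cast
        omega
      rw [join_replicate_succ _ (k + 1) (by omega)]
      simp only [List.foldl_cons, List.foldl_nil, hne, Bool.false_eq_true, if_false,
        Prod.mk.injEq]
      exact ⟨by push_cast; ring, trivial⟩

-- ===== VERDICT (by name: the statement is the Claim_ definition above) =====
theorem perkalian_spec : Claim_equal_perkalian := by
  intro no1 no2 _
  unfold Spec_perkalian perkalian perkalian_alt
  by_cases h : no1 ≤ 0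
  · have h1 : PySem.List.pyRange 0 no1 1 = [] := PySem.List.pyRange_one_eq_nil h
    have h2 : no1.toNat = 0 := Int.toNat_of_nonpos h
    have h3 : max no1 0 = 0 := max_eq_right h
    simp [h1, h2, h3, PySem.Str.join]
  · push_neg at h
    have hn : no1 = (no1.toNat : Int) := (Int.toNat_of_nonneg h.le).symm
    have h3 : max no1 0 = no1 := max_eq_left h.le
    rw [h3, hn, perkalian_loop no2 no1.toNat]
    simp [max_eq_left h.le]
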